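-- pv_equiv track=rewrite | github.com/maruoss/master-thesis | utils/helper.py | get_metric_order
-- ===== SOURCE A (Python) =====
-- def get_metric_order(nested_dic: dict):
--     """get custom order for row indeces of final summary dataframe"""
--     order = list(nested_dic[list(nested_dic.keys())[0]].keys())
--     metric_order = ["val_bal_acc", "train_bal_acc", "val_acc", "train_acc", "val_loss", "train_loss"]
--     for m in metric_order[::-1]:
--         if m in order:
--             order.remove(m)
--             order.insert(0, m) #insert at the front
--     return order
-- ===== SOURCE B (Python) =====
-- def get_metric_order(nested_dic: dict):
--     """get custom order for row indeces of final summary dataframe"""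
--     metric_order = ["val_bal_acc", "train_bal_acc", "val_acc", "train_acc", "val_loss", "train_loss"]
--     first_inner = next(iter(nested_dic.values()))
--     buckets = [[] for _ in range(len(metric_order) + 1)]
--     for k in first_inner:
--         r = metric_order.index(k) if k in metric_order else len(metric_order)
--         buckets[r].append(k)
--     return [k for b in buckets for k in b]
-- ===== Notes on version B (the rewrite author's own statement) =====
-- stated objective: alternative
-- what changed: Replaces the reversed remove/insert mutation loop with a one-pass bucket (counting) sort: each key is appended to the bucket of its priority rank and the buckets are concatenated; the first inner dict is taken via next(iter(values())) instead of keys()[0] indexing.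
import Mathlib
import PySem

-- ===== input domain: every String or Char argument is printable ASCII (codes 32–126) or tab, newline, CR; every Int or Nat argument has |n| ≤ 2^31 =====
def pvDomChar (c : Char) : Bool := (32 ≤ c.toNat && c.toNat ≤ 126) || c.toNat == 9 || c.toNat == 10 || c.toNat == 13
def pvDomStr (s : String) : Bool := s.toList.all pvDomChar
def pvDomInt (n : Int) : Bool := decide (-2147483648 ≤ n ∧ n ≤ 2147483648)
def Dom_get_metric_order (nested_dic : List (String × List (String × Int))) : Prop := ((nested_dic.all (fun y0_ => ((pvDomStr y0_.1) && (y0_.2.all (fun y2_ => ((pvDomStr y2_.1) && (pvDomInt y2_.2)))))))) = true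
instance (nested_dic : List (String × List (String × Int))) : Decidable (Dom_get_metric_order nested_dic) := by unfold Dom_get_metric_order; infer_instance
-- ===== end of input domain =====

-- B replaces A's reversed remove/insert mutation loop by a one-pass bucket (counting) sort on priority rank (alternative algorithm).


-- ===== PORT A =====
def get_metric_order (nested_dic : List (String × List (String × Int))) : List String :=
  let d := PySem.Dict.ofList nested_dic
  match PySem.List.pyGet? (PySem.Dict.keys d) 0 with
  | none => []          -- IndexError on empty dict: excluded by Pre_
  | some k0 =>
    match PySem.Dict.get? d k0 with
    | none => []        -- unreachable: k0 is a key of d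
    | some inner0 =>
      let order := PySem.Dict.keys (PySem.Dict.ofList inner0)
      let metricOrder := ["val_bal_acc", "train_bal_acc", "val_acc", "train_acc", "val_loss", "train_loss"]
      match PySem.List.slice? metricOrder none none (-1) with  -- metric_order[::-1]
      | none => order   -- unreachable: step ≠ 0
      | some rev =>
        rev.foldl (fun ord m =>
          if m ∈ ord then
            match PySem.List.remove? ord m with  -- order.remove(m)
            | none => ord        -- unreachable: m ∈ ord
            | some ord' => m :: ord'             -- order.insert(0, m)
          else ord) order

-- ===== PORT B =====
-- B-side helpers: the priority list and the loop body of Source B's single bucket pass.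
def pvMO : List String := ["val_bal_acc", "train_bal_acc", "val_acc", "train_acc", "val_loss", "train_loss"]

-- r = metric_order.index(k) if k in metric_order else len(metric_order)
def pvRank (k : String) : Nat :=
  if k ∈ pvMO then (PySem.List.index? pvMO k).getD 0 else pvMO.length

-- buckets[r].append(k)
def pvStep (bs : List (List String)) (k : String) : List (List String) :=
  bs.set (pvRank k) (bs[pvRank k]! ++ [k])

def get_metric_order_alt (nested_dic : List (String × List (String × Int))) : List String :=
  match (PySem.Dict.values (PySem.Dict.ofList nested_dic)).head? with
  | none => []          -- next(iter(...)) raises StopIteration on empty dict: excluded by Pre_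
  | some firstInner =>
    let buckets :=
      (PySem.Dict.keys (PySem.Dict.ofList firstInner)).foldl pvStep
        (List.replicate (pvMO.length + 1) [])   -- [[] for _ in range(len(metric_order)+1)]
    buckets.flatten                             -- [k for b in buckets for k in b]

-- ===== PRECONDITION & SPEC =====
-- Pre_ excludes only the empty dict, on which Python A raises IndexError (and B StopIteration).
def Pre_get_metric_order (nested_dic : List (String × List (String × Int))) : Prop := nested_dic ≠ []
instance (nested_dic : List (String × List (String × Int))) : Decidable (Pre_get_metric_order nested_dic) := by unfold Pre_get_metric_order; infer_instance
def pvWitness_get_metric_order : (List (String × List (String × Int))) := [("m1", [("val_acc", 1), ("foo", 2)])]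
def Spec_get_metric_order (nested_dic : List (String × List (String × Int))) (out : List String) : Prop := out = get_metric_order_alt nested_dic
instance (nested_dic : List (String × List (String × Int))) (out : List String) : Decidable (Spec_get_metric_order nested_dic out) := by unfold Spec_get_metric_order; infer_instance

-- ===== CLAIM (what is proved, stated in full; the proofs are below) =====
def Claim_equal_get_metric_order : Prop := ∀ (nested_dic : List (String × List (String × Int))), Dom_get_metric_order nested_dic → Pre_get_metric_order nested_dic → Spec_get_metric_order nested_dic (get_metric_order nested_dic)

-- ===== LEMMAS AND PROOFS =====

-- A's loop over ms[::-1], as a foldr over ms, equals a filter-and-concatenate normal form.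
lemma pv_core (ms ord : List String) (hms : ms.Nodup) (hord : ord.Nodup) :
    ms.foldr (fun m ord =>
      if m ∈ ord then
        match PySem.List.remove? ord m with
        | none => ord
        | some ord' => m :: ord'
      else ord) ord
    = ms.filter (fun m => m ∈ ord) ++ ord.filter (fun k => k ∉ ms) := by
  induction ms with
  | nil => simp
  | cons m ms ih =>
    obtain ⟨hm, hms'⟩ := List.nodup_cons.mp hms
    rw [List.foldr_cons, ih hms']
    by_cases hmem : m ∈ ord
    · have hmA : m ∉ ms.filter (fun x => decide (x ∈ ord)) := by
        simp [List.mem_filter]; intro h; exact absurd h hm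
      have hmB : m ∈ ord.filter (fun k => decide (k ∉ ms)) := by
        simp [List.mem_filter]; exact ⟨hmem, hm⟩
      have hmemApp : m ∈ ms.filter (fun x => decide (x ∈ ord)) ++ ord.filter (fun k => decide (k ∉ ms)) :=
        List.mem_append.mpr (Or.inr hmB)
      have hBnd : (ord.filter (fun k => decide (k ∉ ms))).Nodup := hord.filter _
      rw [if_pos hmemApp, PySem.List.remove?_eq_some_erase _ _ hmemApp,
          List.erase_append_right _ hmA, hBnd.erase_eq_filter]
      have hB : List.filter (fun k => decide (k ∉ m :: ms)) ord
          = List.filter (fun x => decide ¬x = m) (List.filter (fun k => decide (k ∉ ms)) ord) := by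
        rw [List.filter_filter]
        apply List.filter_congr
        intro x hx
        by_cases hxm : x = m <;> simp [hxm]
      rw [hB]
      simp [hmem]
      apply List.filter_congr
      intro x _
      by_cases hxm : x = m <;> simp [hxm]
    · have hmemApp : m ∉ ms.filter (fun x => decide (x ∈ ord)) ++ ord.filter (fun k => decide (k ∉ ms)) := by
        simp only [List.mem_append, List.mem_filter, decide_eq_true_eq, not_or, not_and]
        exact ⟨fun h => absurd h hm, fun h => absurd h hmem⟩
      rw [if_neg hmemApp]
      congr 1
      · simp [hmem]
      · apply List.filter_congr
        intro x hx
        have hxm : x ≠ m := fun h => hmem (h ▸ hx)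
        simp [hxm]

lemma pvR0 : pvRank "val_bal_acc" = 0 := by decide
lemma pvR1 : pvRank "train_bal_acc" = 1 := by decide
lemma pvR2 : pvRank "val_acc" = 2 := by decide
lemma pvR3 : pvRank "train_acc" = 3 := by decide
lemma pvR4 : pvRank "val_loss" = 4 := by decide
lemma pvR5 : pvRank "train_loss" = 5 := by decide

-- the keys that land in bucket r
def pvF (r : Nat) (keys : List String) : List String := keys.filter (fun k => pvRank k == r)

-- B's bucket pass, characterised bucket by bucket.
lemma pv_loop (keys : List String) : ∀ (b0 b1 b2 b3 b4 b5 b6 : List String),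
    keys.foldl pvStep [b0, b1, b2, b3, b4, b5, b6] =
      [b0 ++ pvF 0 keys, b1 ++ pvF 1 keys, b2 ++ pvF 2 keys, b3 ++ pvF 3 keys,
       b4 ++ pvF 4 keys, b5 ++ pvF 5 keys, b6 ++ pvF 6 keys] := by
  induction keys with
  | nil => intro b0 b1 b2 b3 b4 b5 b6; simp [pvF]
  | cons k ks ih =>
    intro b0 b1 b2 b3 b4 b5 b6
    rw [List.foldl_cons]
    by_cases h0 : k = "val_bal_acc"
    · subst h0
      rw [show pvStep [b0,b1,b2,b3,b4,b5,b6] "val_bal_acc" = [b0 ++ ["val_bal_acc"],b1,b2,b3,b4,b5,b6] by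
            simp [pvStep, pvR0]]
      rw [ih]; simp [pvF, pvR0]
    · by_cases h1 : k = "train_bal_acc"
      · subst h1
        rw [show pvStep [b0,b1,b2,b3,b4,b5,b6] "train_bal_acc" = [b0,b1 ++ ["train_bal_acc"],b2,b3,b4,b5,b6] by
              simp [pvStep, pvR1]]
        rw [ih]; simp [pvF, pvR1]
      · by_cases h2 : k = "val_acc"
        · subst h2
          rw [show pvStep [b0,b1,b2,b3,b4,b5,b6] "val_acc" = [b0,b1,b2 ++ ["val_acc"],b3,b4,b5,b6] by
                simp [pvStep, pvR2]]
          rw [ih]; simp [pvF, pvR2]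
        · by_cases h3 : k = "train_acc"
          · subst h3
            rw [show pvStep [b0,b1,b2,b3,b4,b5,b6] "train_acc" = [b0,b1,b2,b3 ++ ["train_acc"],b4,b5,b6] by
                  simp [pvStep, pvR3]]
            rw [ih]; simp [pvF, pvR3]
          · by_cases h4 : k = "val_loss"
            · subst h4
              rw [show pvStep [b0,b1,b2,b3,b4,b5,b6] "val_loss" = [b0,b1,b2,b3,b4 ++ ["val_loss"],b5,b6] by
                    simp [pvStep, pvR4]]
              rw [ih]; simp [pvF, pvR4]
            · by_cases h5 : k = "train_loss"
              · subst h5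
                rw [show pvStep [b0,b1,b2,b3,b4,b5,b6] "train_loss" = [b0,b1,b2,b3,b4,b5 ++ ["train_loss"],b6] by
                      simp [pvStep, pvR5]]
                rw [ih]; simp [pvF, pvR5]
              · have hr : pvRank k = 6 := by
                  simp [pvRank, pvMO, h0, h1, h2, h3, h4, h5]
                rw [show pvStep [b0,b1,b2,b3,b4,b5,b6] k = [b0,b1,b2,b3,b4,b5,b6 ++ [k]] by
                      simp [pvStep, hr]]
                rw [ih]; simp [pvF, hr]

-- with no duplicates, filtering for one value gives at most a singleton
lemma pv_filter_single (m : String) (keys : List String) (h : keys.Nodup) :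
    keys.filter (fun k => k == m) = if m ∈ keys then [m] else [] := by
  induction keys with
  | nil => simp
  | cons k ks ih =>
    obtain ⟨hk, hks⟩ := List.nodup_cons.mp h
    by_cases hkm : k = m
    · subst hkm
      have : k ∉ ks := hk
      simp [ih hks, this]
    · simp [hkm, ih hks, Ne.symm hkm]

-- rank characterisations, one per bucket
lemma pv_rank_eq (k : String) (r : Nat) (hr : r < 6) :
    (pvRank k == r) = (k == pvMO[r]!) := by
  by_cases h0 : k = "val_bal_acc"
  · subst h0; interval_cases r <;> decide
  by_cases h1 : k = "train_bal_acc"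
  · subst h1; interval_cases r <;> decide
  by_cases h2 : k = "val_acc"
  · subst h2; interval_cases r <;> decide
  by_cases h3 : k = "train_acc"
  · subst h3; interval_cases r <;> decide
  by_cases h4 : k = "val_loss"
  · subst h4; interval_cases r <;> decide
  by_cases h5 : k = "train_loss"
  · subst h5; interval_cases r <;> decide
  have hrk : pvRank k = 6 := by simp [pvRank, pvMO, h0, h1, h2, h3, h4, h5]
  have : (k == pvMO[r]!) = false := by
    interval_cases r <;> simp [pvMO, h0, h1, h2, h3, h4, h5]
  rw [hrk, this]
  simp
  omega

lemma pv_rank6 (k : String) : (pvRank k == 6) = decide (k ∉ pvMO) := by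
  by_cases hm : k ∈ pvMO
  · fin_cases hm <;> decide
  · simp [pvRank, hm]
    rfl

-- filter as a concatenation of singleton tests, element by element
lemma pv_filter_split (ms keys : List String) :
    ms.filter (fun m => m ∈ keys)
      = ms.foldr (fun m acc => (if m ∈ keys then [m] else []) ++ acc) [] := by
  induction ms with
  | nil => simp
  | cons m ms ih => by_cases hmk : m ∈ keys <;> simp [hmk, ih]

-- the flattened buckets are exactly A's filter-and-concatenate normal form
lemma pv_main (keys : List String) (h : keys.Nodup) :
    (keys.foldl pvStep (List.replicate (pvMO.length + 1) [])).flatten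
      = pvMO.filter (fun m => m ∈ keys) ++ keys.filter (fun k => k ∉ pvMO) := by
  have hrep : (List.replicate (pvMO.length + 1) ([] : List String)) = [[],[],[],[],[],[],[]] := by
    rfl
  rw [hrep, pv_loop]
  have hF : ∀ r : Nat, r < 6 → pvF r keys = if pvMO[r]! ∈ keys then [pvMO[r]!] else [] := by
    intro r hr
    rw [pvF, List.filter_congr (fun k _ => pv_rank_eq k r hr), pv_filter_single _ _ h]
  have h6 : pvF 6 keys = keys.filter (fun k => k ∉ pvMO) := by
    rw [pvF, List.filter_congr (fun k _ => pv_rank6 k)]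
  rw [hF 0 (by omega), hF 1 (by omega), hF 2 (by omega), hF 3 (by omega), hF 4 (by omega),
      hF 5 (by omega), h6, pv_filter_split,
      show pvMO[0]! = "val_bal_acc" from rfl, show pvMO[1]! = "train_bal_acc" from rfl,
      show pvMO[2]! = "val_acc" from rfl, show pvMO[3]! = "train_acc" from rfl,
      show pvMO[4]! = "val_loss" from rfl, show pvMO[5]! = "train_loss" from rfl,
      show pvMO = ["val_bal_acc", "train_bal_acc", "val_acc", "train_acc", "val_loss", "train_loss"]
        from rfl]
  simp only [List.flatten_cons, List.flatten_nil, List.nil_append, List.append_nil,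
    List.foldr_cons, List.foldr_nil, List.append_assoc]

-- ===== VERDICT (by name: the statement is the Claim_ definition above) =====
theorem get_metric_order_spec : Claim_equal_get_metric_order := by
  intro nested_dic _ _
  show get_metric_order nested_dic = get_metric_order_alt nested_dic
  simp only [get_metric_order, get_metric_order_alt]
  cases hd : (PySem.Dict.ofList nested_dic).items with
  | nil =>
    simp [PySem.Dict.keys, PySem.Dict.values, hd, PySem.List.pyGet?, PySem.List.pyIdx?]
  | cons p t =>
    obtain ⟨k0, v0⟩ := p
    have hkeys : PySem.Dict.keys (PySem.Dict.ofList nested_dic) = k0 :: t.map Prod.fst := by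
      simp [PySem.Dict.keys, hd]
    have hvals : PySem.Dict.values (PySem.Dict.ofList nested_dic) = v0 :: t.map Prod.snd := by
      simp [PySem.Dict.values, hd]
    have hget0 : PySem.List.pyGet? (k0 :: t.map Prod.fst) 0 = some k0 := by
      simp [PySem.List.pyGet?, PySem.List.pyIdx?]
    have hgetk : PySem.Dict.get? (PySem.Dict.ofList nested_dic) k0 = some v0 := by
      simp [PySem.Dict.get?, hd]
    rw [hkeys, hvals, hget0]
    simp only [hgetk, List.head?]
    rw [PySem.List.slice?_none_none_neg_one]
    simp only
    rw [List.foldl_reverse, pv_core _ _ (by decide) (PySem.Dict.nodup_keys_ofList v0)]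
    rw [pv_main _ (PySem.Dict.nodup_keys_ofList v0)]
    rfl
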